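-- pv_equiv track=rewrite | github.com/gdg-work/OTUS_hw01-process_nginx_log | src/config_file_parser.py | template_to_glob
-- ===== SOURCE A (Python) =====
-- def template_to_glob(tmpl :str) -> str:
--     """converts filename template with strptime metacharacters to
--        shell globbing pattern.  Not all metacharacters are supported yet, only %[YmdbF]
--        Years are limited by pattern 20xx, where x is [0-9]
--     """
--     metachar_table = {
--         '%F': '20[0-9][0-9]-[01][0-9]-[0-3][0-9]',
--         '%Y': '20[0-9][0-9]',
--         '%m': '[01][0-9]',
--         '%d': '[0-3][0-9]',
--         '%b': '[A-Z][a-z][a-z]',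
--         }
--     curstr = tmpl
--     for mc in metachar_table.keys():
--         curstr = curstr.replace(mc, metachar_table[mc])
--     return curstr
-- ===== SOURCE B (Python) =====
-- def template_to_glob(tmpl: str) -> str:
--     """Single left-to-right scan: on '%' followed by a known metachar letter,
--        emit that glob pattern and skip both chars; otherwise copy one char."""
--     metachar_table = {
--         'F': '20[0-9][0-9]-[01][0-9]-[0-3][0-9]',
--         'Y': '20[0-9][0-9]',
--         'm': '[01][0-9]',
--         'd': '[0-3][0-9]',
--         'b': '[A-Z][a-z][a-z]',
--         }
--     out = []
--     i = 0
--     n = len(tmpl)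
--     while i < n:
--         c = tmpl[i]
--         if c == '%' and i + 1 < n and tmpl[i + 1] in metachar_table:
--             out.append(metachar_table[tmpl[i + 1]])
--             i += 2
--         else:
--             out.append(c)
--             i += 1
--     return ''.join(out)
-- ===== Notes on version B (the rewrite author's own statement) =====
-- stated objective: alternative
-- what changed: A makes five sequential str.replace passes over the whole string (one per metachar); B scans the template once left to right, emitting the table's glob pattern when a percent sign is followed by a known metachar letter and copying the character otherwise.
import Mathlib
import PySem

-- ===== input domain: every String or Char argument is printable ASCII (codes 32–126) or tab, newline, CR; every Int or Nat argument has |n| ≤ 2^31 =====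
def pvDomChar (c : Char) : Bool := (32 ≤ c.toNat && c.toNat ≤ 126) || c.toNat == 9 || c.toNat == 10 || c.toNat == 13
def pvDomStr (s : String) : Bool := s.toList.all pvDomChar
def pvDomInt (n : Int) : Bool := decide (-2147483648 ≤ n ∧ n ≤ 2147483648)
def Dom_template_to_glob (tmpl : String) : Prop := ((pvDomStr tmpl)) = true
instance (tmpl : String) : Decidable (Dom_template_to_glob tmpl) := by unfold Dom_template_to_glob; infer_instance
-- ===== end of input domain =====

-- B replaces A's five sequential str.replace passes by a single left-to-right scan of the
-- template that looks each metachar up in the table directly (objective: alternative --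
-- one traversal instead of five, same result).

-- ===== PORT A =====
def template_to_glob (tmpl : String) : String :=
  let metachar_table : List (String × String) :=
    [("%F", "20[0-9][0-9]-[01][0-9]-[0-3][0-9]"),
     ("%Y", "20[0-9][0-9]"),
     ("%m", "[01][0-9]"),
     ("%d", "[0-3][0-9]"),
     ("%b", "[A-Z][a-z][a-z]")]
  metachar_table.foldl (fun curstr mc => PySem.Str.replace curstr mc.1 mc.2) tmpl

-- ===== PORT B =====
-- the five glob patterns, as char lists (B scans on the char level)
def patF : List Char := "20[0-9][0-9]-[01][0-9]-[0-3][0-9]".toList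
def patY : List Char := "20[0-9][0-9]".toList
def patm : List Char := "[01][0-9]".toList
def patd : List Char := "[0-3][0-9]".toList
def patb : List Char := "[A-Z][a-z][a-z]".toList

def tglobPat (c : Char) : Option (List Char) :=
  if c = 'F' then some patF
  else if c = 'Y' then some patY
  else if c = 'm' then some patm
  else if c = 'd' then some patd
  else if c = 'b' then some patb
  else none

def tglobScan : List Char → List Char
  | [] => []
  | [c] => [c]
  | c :: d :: t =>
    if c = '%' then
      match tglobPat d with
      | some p => p ++ tglobScan t
      | none => c :: tglobScan (d :: t)
    else c :: tglobScan (d :: t)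
termination_by l => l.length

def template_to_glob_alt (tmpl : String) : String :=
  String.ofList (tglobScan tmpl.toList)

-- ===== PRECONDITION & SPEC =====
def Spec_template_to_glob (tmpl : String) (out : String) : Prop := out = template_to_glob_alt tmpl
instance (tmpl : String) (out : String) : Decidable (Spec_template_to_glob tmpl out) := by unfold Spec_template_to_glob; infer_instance

-- ===== CLAIM (what is proved, stated in full; the proofs are below) =====
def Claim_equal_template_to_glob : Prop := ∀ (tmpl : String), Dom_template_to_glob tmpl → Spec_template_to_glob tmpl (template_to_glob tmpl)

-- ===== LEMMAS AND PROOFS =====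

-- recursive characterisation of s.replace(['%',k], new) (A's primitive, non-overlapping, left to right)
def tglobRep (k : Char) (new : List Char) : List Char → List Char
  | [] => []
  | [c] => [c]
  | c :: d :: t => if c = '%' ∧ d = k then new ++ tglobRep k new t else c :: tglobRep k new (d :: t)
termination_by l => l.length

theorem tglob_go_eq (k : Char) (new : List Char) :
    ∀ (fuel : Nat) (l acc : List Char), l.length ≤ fuel →
    PySem.Chars.replace.go ['%', k] new fuel l acc = acc.reverse ++ tglobRep k new l := by
  intro fuel
  induction fuel with
  | zero =>
    intro l acc h
    have : l = [] := by cases l <;> simp_all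
    subst this
    simp [PySem.Chars.replace.go, tglobRep]
  | succ n ih =>
    intro l acc h
    match l with
    | [] => simp [PySem.Chars.replace.go, tglobRep]
    | [c] =>
      simp only [PySem.Chars.replace.go, tglobRep]
      have : ¬ (List.isPrefixOf ['%', k] [c] = true) := by simp [List.isPrefixOf]
      rw [if_neg this, ih [] (c :: acc) (by simp)]
      simp [tglobRep]
    | c :: d :: t =>
      simp only [PySem.Chars.replace.go]
      by_cases hck : c = '%' ∧ d = k
      · have hpre : List.isPrefixOf ['%', k] (c :: d :: t) = true := by
          simp [List.isPrefixOf, hck.1, hck.2]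
        rw [if_pos hpre]
        have ht : t.length ≤ n := by simp only [List.length_cons] at h; omega
        rw [show List.drop (List.length ['%', k]) (c :: d :: t) = t by simp]
        rw [ih t (new.reverse ++ acc) ht]
        simp [tglobRep, hck.1, hck.2]
      · have hpre : ¬ (List.isPrefixOf ['%', k] (c :: d :: t) = true) := by
          simp only [List.isPrefixOf, Bool.and_eq_true, beq_iff_eq, and_true]
          intro hcontra
          exact hck ⟨hcontra.1.symm, hcontra.2.symm⟩
        rw [if_neg hpre]
        have ht : (d :: t).length ≤ n := by simp only [List.length_cons] at h ⊢; omega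
        rw [ih (d :: t) (c :: acc) ht]
        simp [tglobRep, hck]

theorem tglob_replace_eq (k : Char) (new l : List Char) :
    PySem.Chars.replace l ['%', k] new = tglobRep k new l := by
  rw [PySem.Chars.replace]
  simp only [List.isEmpty_cons]
  exact tglob_go_eq k new l.length l [] le_rfl

theorem tglob_strRep (k : Char) (o n : String) (ho : o.toList = ['%', k]) (s : String) :
    (PySem.Str.replace s o n).toList = tglobRep k n.toList s.toList := by
  simp [PySem.Str.replace, ho, tglob_replace_eq]

-- plain-copy step: a non-'%' head passes through unchanged
theorem tglobRep_cons_ne (k : Char) (new : List Char) {c : Char} (h : c ≠ '%') (t : List Char) :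
    tglobRep k new (c :: t) = c :: tglobRep k new t := by
  cases t <;> simp [tglobRep, h]

-- a '%'-free prefix distributes over the replace
theorem tglobRep_append (k : Char) (new : List Char) {a : List Char} (h : '%' ∉ a) (x : List Char) :
    tglobRep k new (a ++ x) = a ++ tglobRep k new x := by
  induction a with
  | nil => simp
  | cons c t ih =>
    have hc : c ≠ '%' := by intro hc; exact h (hc ▸ List.mem_cons_self)
    have ht : '%' ∉ t := fun hm => h (List.mem_cons_of_mem _ hm)
    simp only [List.cons_append, tglobRep_cons_ne k new hc, ih ht]

theorem tglobRep_match (k : Char) (new t : List Char) :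
    tglobRep k new ('%' :: k :: t) = new ++ tglobRep k new t := by
  simp [tglobRep]

theorem tglobRep_pct_ne (k : Char) (new : List Char) {d : Char} (hd : d ≠ k) (t : List Char) :
    tglobRep k new ('%' :: d :: t) = '%' :: tglobRep k new (d :: t) := by
  simp [tglobRep, hd]

-- '%' followed by anything whose head is not the key passes the '%' through
theorem tglobRep_pct_of_head (k : Char) (new Z : List Char)
    (h : ∀ g, Z.head? = some g → g ≠ k) :
    tglobRep k new ('%' :: Z) = '%' :: tglobRep k new Z := by
  cases Z with
  | nil => simp [tglobRep]
  | cons g u => exact tglobRep_pct_ne k new (h g rfl) u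

-- heads of intermediate results stay in {'%','2','['}, never a metachar letter
theorem tglobRep_head (k : Char) (new : List Char) (hk : k ≠ '2' ∧ k ≠ '[')
    (h' : Char) (hnew : new.head? = some h') (hS : h' = '2' ∨ h' = '[')
    (h : Char) (t : List Char) (hh : h = '%' ∨ h = '2' ∨ h = '[') :
    ∃ g, (g = '%' ∨ g = '2' ∨ g = '[') ∧ (tglobRep k new (h :: t)).head? = some g := by
  rcases hh with hh | hh
  · subst hh
    cases t with
    | nil => exact ⟨'%', Or.inl rfl, by simp [tglobRep]⟩
    | cons d u =>
      by_cases hd : d = k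
      · subst hd
        refine ⟨h', Or.inr hS, ?_⟩
        rw [tglobRep_match]
        cases new with
        | nil => simp at hnew
        | cons n0 ns => simp at hnew; simp [hnew]
      · exact ⟨'%', Or.inl rfl, by rw [tglobRep_pct_ne k new hd]; simp⟩
  · have hne : h ≠ '%' := by rcases hh with hh | hh <;> subst hh <;> decide
    exact ⟨h, Or.inr hh, by rw [tglobRep_cons_ne k new hne]; simp⟩

-- the five-pass chain, list level
def tglobChain (l : List Char) : List Char :=
  tglobRep 'b' patb (tglobRep 'd' patd (tglobRep 'm' patm (tglobRep 'Y' patY (tglobRep 'F' patF l))))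

-- '%' followed by a list whose head is a "safe" char passes the '%' through, and the
-- head of the result is again safe (safe = '%', '2' or '[': never a metachar letter)
theorem tglobRep_pct_S (k : Char) (new : List Char) (hk : k ≠ '2' ∧ k ≠ '[') (hk2 : k ≠ '%')
    (h' : Char) (hnew : new.head? = some h') (hS : h' = '2' ∨ h' = '[')
    (Z : List Char) (hZ : ∃ g, (g = '%' ∨ g = '2' ∨ g = '[') ∧ Z.head? = some g) :
    tglobRep k new ('%' :: Z) = '%' :: tglobRep k new Z ∧
    ∃ g, (g = '%' ∨ g = '2' ∨ g = '[') ∧ (tglobRep k new Z).head? = some g := by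
  obtain ⟨g, hgS, hg⟩ := hZ
  obtain ⟨u, rfl⟩ : ∃ u, Z = g :: u := by
    cases Z with
    | nil => simp at hg
    | cons z u => simp at hg; exact ⟨u, by rw [hg]⟩
  constructor
  · apply tglobRep_pct_of_head
    intro g' hg'
    simp at hg'
    subst hg'
    intro hgk
    subst hgk
    rcases hgS with h | h | h
    · exact hk2 h
    · exact hk.1 h
    · exact hk.2 h
  · exact tglobRep_head k new hk h' hnew hS g u hgS

theorem tglobChain_eq_scan (l : List Char) : tglobChain l = tglobScan l := by
  have hFn : '%' ∉ patF := by decide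
  have hYn : '%' ∉ patY := by decide
  have hmn : '%' ∉ patm := by decide
  have hdn : '%' ∉ patd := by decide
  induction l using tglobScan.induct with
  | case1 => simp [tglobChain, tglobRep, tglobScan]
  | case2 c => simp [tglobChain, tglobRep, tglobScan]
  | case3 d t p hp ih =>
    rw [show tglobScan ('%' :: d :: t) = p ++ tglobScan t from by rw [tglobScan]; simp [hp]]
    unfold tglobChain at ih ⊢
    rw [← ih]
    unfold tglobPat at hp
    split_ifs at hp with h1 h2 h3 h4 h5
    · -- d = 'F'
      subst h1; injection hp with hp; subst hp
      rw [tglobRep_match 'F' patF, tglobRep_append 'Y' patY hFn,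
          tglobRep_append 'm' patm hFn, tglobRep_append 'd' patd hFn,
          tglobRep_append 'b' patb hFn]
    · -- d = 'Y'
      subst h2; injection hp with hp; subst hp
      rw [tglobRep_pct_ne 'F' patF (by decide) t, tglobRep_cons_ne 'F' patF (by decide) t,
          tglobRep_match 'Y' patY, tglobRep_append 'm' patm hYn,
          tglobRep_append 'd' patd hYn, tglobRep_append 'b' patb hYn]
    · -- d = 'm'
      subst h3; injection hp with hp; subst hp
      rw [tglobRep_pct_ne 'F' patF (by decide) t, tglobRep_cons_ne 'F' patF (by decide) t,
          tglobRep_pct_ne 'Y' patY (by decide), tglobRep_cons_ne 'Y' patY (by decide),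
          tglobRep_match 'm' patm, tglobRep_append 'd' patd hmn,
          tglobRep_append 'b' patb hmn]
    · -- d = 'd'
      subst h4; injection hp with hp; subst hp
      rw [tglobRep_pct_ne 'F' patF (by decide) t, tglobRep_cons_ne 'F' patF (by decide) t,
          tglobRep_pct_ne 'Y' patY (by decide), tglobRep_cons_ne 'Y' patY (by decide),
          tglobRep_pct_ne 'm' patm (by decide), tglobRep_cons_ne 'm' patm (by decide),
          tglobRep_match 'd' patd, tglobRep_append 'b' patb hdn]
    · -- d = 'b'
      subst h5; injection hp with hp; subst hp
      rw [tglobRep_pct_ne 'F' patF (by decide) t, tglobRep_cons_ne 'F' patF (by decide) t,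
          tglobRep_pct_ne 'Y' patY (by decide), tglobRep_cons_ne 'Y' patY (by decide),
          tglobRep_pct_ne 'm' patm (by decide), tglobRep_cons_ne 'm' patm (by decide),
          tglobRep_pct_ne 'd' patd (by decide), tglobRep_cons_ne 'd' patd (by decide),
          tglobRep_match 'b' patb]
  | case4 d t hp ih =>
    rw [show tglobScan ('%' :: d :: t) = '%' :: tglobScan (d :: t) from by
      rw [tglobScan]; simp [hp]]
    rw [← ih]
    unfold tglobChain
    by_cases hdp : d = '%'
    · subst hdp
      have h0 : ∃ g, (g = '%' ∨ g = '2' ∨ g = '[') ∧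
          (tglobRep 'F' patF ('%' :: t)).head? = some g :=
        tglobRep_head 'F' patF (by decide) '2' (by decide) (by decide) '%' t (Or.inl rfl)
      obtain ⟨e1, h1⟩ := tglobRep_pct_S 'Y' patY (by decide) (by decide) '2' (by decide) (by decide) _ h0
      obtain ⟨e2, h2⟩ := tglobRep_pct_S 'm' patm (by decide) (by decide) '[' (by decide) (by decide) _ h1
      obtain ⟨e3, h3⟩ := tglobRep_pct_S 'd' patd (by decide) (by decide) '[' (by decide) (by decide) _ h2
      obtain ⟨e4, _⟩ := tglobRep_pct_S 'b' patb (by decide) (by decide) '[' (by decide) (by decide) _ h3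
      rw [tglobRep_pct_ne 'F' patF (by decide) t, e1, e2, e3, e4]
    · have hdF : d ≠ 'F' := by intro h; subst h; simp [tglobPat] at hp
      have hdY : d ≠ 'Y' := by intro h; subst h; simp [tglobPat] at hp
      have hdm : d ≠ 'm' := by intro h; subst h; simp [tglobPat] at hp
      have hdd : d ≠ 'd' := by intro h; subst h; simp [tglobPat] at hp
      have hdb : d ≠ 'b' := by intro h; subst h; simp [tglobPat] at hp
      rw [tglobRep_pct_ne 'F' patF hdF t, tglobRep_cons_ne 'F' patF hdp t,
          tglobRep_pct_ne 'Y' patY hdY, tglobRep_cons_ne 'Y' patY hdp,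
          tglobRep_pct_ne 'm' patm hdm, tglobRep_cons_ne 'm' patm hdp,
          tglobRep_pct_ne 'd' patd hdd, tglobRep_cons_ne 'd' patd hdp,
          tglobRep_pct_ne 'b' patb hdb, tglobRep_cons_ne 'b' patb hdp]
  | case5 c d t hc ih =>
    rw [show tglobScan (c :: d :: t) = c :: tglobScan (d :: t) from by
      rw [tglobScan]; simp [hc]]
    rw [← ih]
    unfold tglobChain
    rw [tglobRep_cons_ne 'F' patF hc (d :: t), tglobRep_cons_ne 'Y' patY hc,
        tglobRep_cons_ne 'm' patm hc, tglobRep_cons_ne 'd' patd hc,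
        tglobRep_cons_ne 'b' patb hc]

theorem portA_toList (tmpl : String) : (template_to_glob tmpl).toList = tglobChain tmpl.toList := by
  simp only [template_to_glob, List.foldl]
  rw [tglob_strRep 'b' _ _ (by decide), tglob_strRep 'd' _ _ (by decide),
      tglob_strRep 'm' _ _ (by decide), tglob_strRep 'Y' _ _ (by decide),
      tglob_strRep 'F' _ _ (by decide)]
  rfl

-- ===== VERDICT (by name: the statement is the Claim_ definition above) =====
theorem template_to_glob_spec : Claim_equal_template_to_glob := by
  intro tmpl _
  unfold Spec_template_to_glob
  apply String.toList_inj.mp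
  rw [portA_toList, tglobChain_eq_scan]
  simp [template_to_glob_alt]
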